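-- pv_equiv track=rewrite | github.com/xoesae/programming-functional | EPs/EP2/2021101100.py | jogouPonta
-- ===== SOURCE A (Python) =====
-- def jogouPonta(tabuleiro, jogou=0, pontas=[1, 3, 7, 9], i=0):
--     """
--     Verifica se alguem jogou nas pontas e retorna a quantidade de pontas jogadas
--     """
--     if i < len(tabuleiro):
--         if tabuleiro[i] != ' ':
--             if i in pontas:
--                 return jogouPonta(tabuleiro, jogou+1, pontas, i+1)
--             else:
--                 return jogouPonta(tabuleiro, jogou, pontas, i+1)
--         else:
--             return jogouPonta(tabuleiro, jogou, pontas, i+1)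
--     else:
--         return jogou
-- ===== SOURCE B (Python) =====
-- def jogouPonta(tabuleiro, jogou=0, pontas=[1, 3, 7, 9], i=0):
--     """
--     Verifica se alguem jogou nas pontas e retorna a quantidade de pontas jogadas
--     """
--     count = jogou
--     for j in range(i, len(tabuleiro)):
--         if tabuleiro[j] != ' ' and j in pontas:
--             count += 1
--     return count
-- ===== Notes on version B (the rewrite author's own statement) =====
-- stated objective: simpler
-- what changed: The tail recursion carrying (jogou, i) through three branches is replaced by a single explicit loop over range(i, len(tabuleiro)) that increments a counter when the cell is non-blank and the index is a ponta.
import Mathlib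
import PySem

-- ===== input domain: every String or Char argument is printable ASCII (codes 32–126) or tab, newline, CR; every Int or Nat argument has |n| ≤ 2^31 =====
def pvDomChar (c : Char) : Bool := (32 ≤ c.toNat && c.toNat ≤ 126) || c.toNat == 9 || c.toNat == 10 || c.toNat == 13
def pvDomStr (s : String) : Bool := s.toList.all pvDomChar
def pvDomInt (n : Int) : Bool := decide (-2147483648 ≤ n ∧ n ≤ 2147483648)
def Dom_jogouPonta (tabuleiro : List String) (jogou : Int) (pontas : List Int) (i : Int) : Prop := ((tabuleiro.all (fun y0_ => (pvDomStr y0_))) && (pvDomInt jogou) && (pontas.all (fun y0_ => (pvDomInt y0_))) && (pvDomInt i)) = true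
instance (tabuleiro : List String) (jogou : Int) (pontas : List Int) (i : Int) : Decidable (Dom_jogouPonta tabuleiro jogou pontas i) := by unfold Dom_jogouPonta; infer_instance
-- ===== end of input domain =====

-- B replaces A's three-branch tail recursion by one explicit counting loop over
-- range(i, len(tabuleiro)); same return value wherever A returns (objective: simpler).

-- ===== PORT A =====
-- A's recursion: tabuleiro[i] is Python indexing; outside Pre_ (i < -len) Python
-- raises IndexError, here pyGet? returns none and we default to " " (never reached under Pre_).
def jogouPonta (tabuleiro : List String) (jogou : Int) (pontas : List Int) (i : Int) : Int :=
  if h : i < (tabuleiro.length : Int) then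
    if (PySem.List.pyGet? tabuleiro i).getD " " ≠ " " then
      if i ∈ pontas then jogouPonta tabuleiro (jogou + 1) pontas (i + 1)
      else jogouPonta tabuleiro jogou pontas (i + 1)
    else jogouPonta tabuleiro jogou pontas (i + 1)
  else jogou
termination_by ((tabuleiro.length : Int) - i).toNat
decreasing_by all_goals omega

-- ===== PORT B =====
def jogouPonta_alt (tabuleiro : List String) (jogou : Int) (pontas : List Int) (i : Int) : Int :=
  (PySem.List.pyRange i (tabuleiro.length : Int) 1).foldl
    (fun count j =>
      if (PySem.List.pyGet? tabuleiro j).getD " " ≠ " " ∧ j ∈ pontas then count + 1 else count)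
    jogou

-- ===== PRECONDITION & SPEC =====
-- Pre_ excludes exactly the inputs where Python A raises IndexError (first index i below -len(tabuleiro)); B raises there too.
def Pre_jogouPonta (tabuleiro : List String) (jogou : Int) (pontas : List Int) (i : Int) : Prop :=
  -(tabuleiro.length : Int) ≤ i
instance (tabuleiro : List String) (jogou : Int) (pontas : List Int) (i : Int) : Decidable (Pre_jogouPonta tabuleiro jogou pontas i) := by unfold Pre_jogouPonta; infer_instance

def pvWitness_jogouPonta : List String × Int × List Int × Int := (["x", " ", "o", "x"], 0, [1, 3, 7, 9], 0)

def Spec_jogouPonta (tabuleiro : List String) (jogou : Int) (pontas : List Int) (i : Int) (out : Int) : Prop := out = jogouPonta_alt tabuleiro jogou pontas i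
instance (tabuleiro : List String) (jogou : Int) (pontas : List Int) (i : Int) (out : Int) : Decidable (Spec_jogouPonta tabuleiro jogou pontas i out) := by unfold Spec_jogouPonta; infer_instance

-- ===== CLAIM (what is proved, stated in full; the proofs are below) =====
def Claim_equal_jogouPonta : Prop := ∀ (tabuleiro : List String) (jogou : Int) (pontas : List Int) (i : Int), Dom_jogouPonta tabuleiro jogou pontas i → Pre_jogouPonta tabuleiro jogou pontas i → Spec_jogouPonta tabuleiro jogou pontas i (jogouPonta tabuleiro jogou pontas i)

-- ===== LEMMAS AND PROOFS =====

-- the two ports agree for every starting index and accumulator (no Pre_ needed: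
-- both ports treat an out-of-range cell as blank)
theorem jogouPonta_eq_alt (tabuleiro : List String) (pontas : List Int) :
    ∀ (n : ℕ) (i jogou : Int), ((tabuleiro.length : Int) - i).toNat = n →
      jogouPonta tabuleiro jogou pontas i = jogouPonta_alt tabuleiro jogou pontas i := by
  intro n
  induction n with
  | zero =>
    intro i jogou hn
    have hge : (tabuleiro.length : Int) ≤ i := by omega
    rw [jogouPonta]
    simp only [dif_neg (not_lt.mpr hge)]
    rw [jogouPonta_alt, PySem.List.pyRange_one_eq_nil hge, List.foldl_nil]
  | succ n ih =>
    intro i jogou hn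
    have hlt : i < (tabuleiro.length : Int) := by omega
    have hn' : ((tabuleiro.length : Int) - (i + 1)).toNat = n := by omega
    rw [jogouPonta]
    simp only [dif_pos hlt]
    rw [jogouPonta_alt, PySem.List.pyRange_one_cons hlt, List.foldl_cons]
    by_cases h1 : (PySem.List.pyGet? tabuleiro i).getD " " ≠ " "
    · by_cases h2 : i ∈ pontas
      · rw [if_pos h1, if_pos h2, if_pos (And.intro h1 h2)]
        exact (ih (i + 1) (jogou + 1) hn').trans (by rw [jogouPonta_alt])
      · rw [if_pos h1, if_neg h2, if_neg (by tauto)]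
        exact (ih (i + 1) jogou hn').trans (by rw [jogouPonta_alt])
    · rw [if_neg h1, if_neg (by tauto)]
      exact (ih (i + 1) jogou hn').trans (by rw [jogouPonta_alt])

-- ===== VERDICT (by name: the statement is the Claim_ definition above) =====
theorem jogouPonta_spec : Claim_equal_jogouPonta := by
  intro tabuleiro jogou pontas i _ _
  exact jogouPonta_eq_alt tabuleiro pontas _ i jogou rfl
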